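-- pv_equiv track=rewrite | github.com/mrt150683-lgtm/Compression-Language-Vocabulary | inference/compress_wrap.py | find_longest_matches
-- ===== SOURCE A (Python) =====
-- from typing import List, Tuple, Dict, Any, Optional
--
-- def find_longest_matches(
--     text: str,
--     clv_map: Dict[str, int],
--     case_sensitive: bool = False
-- ) -> List[Tuple[int, int, int, str]]:
--     """
--     Find longest-matching phrases in text using greedy longest-match algorithm.
--
--     Args:
--         text: Input text string
--         clv_map: Phrase -> code index mapping
--         case_sensitive: Whether matching is case-sensitive (default: False)
--
--     Returns:
--         List of (start_pos, end_pos, code_index, phrase) tuples, non-overlapping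
--         Sorted by start position
--     """
--     if not case_sensitive:
--         text_lower = text.lower()
--         # Create case-insensitive mapping
--         clv_map_lower = {phrase.lower(): code_idx for phrase, code_idx in clv_map.items()}
--         clv_map_to_use = clv_map_lower
--         text_to_search = text_lower
--     else:
--         clv_map_to_use = clv_map
--         text_to_search = text
--
--     # Sort phrases by length (longest first) for longest-match
--     phrases_sorted = sorted(clv_map_to_use.keys(), key=len, reverse=True)
--
--     matches = []
--     used_positions = set()  # Track used character positions
--
--     # Greedy longest-match: try longest phrases first
--     for phrase in phrases_sorted:
--         code_idx = clv_map_to_use[phrase]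
--
--         # Find all occurrences of this phrase
--         start = 0
--         while True:
--             pos = text_to_search.find(phrase, start)
--             if pos == -1:
--                 break
--
--             end = pos + len(phrase)
--
--             # Check if this position range overlaps with any existing match
--             overlaps = False
--             for used_start, used_end in used_positions:
--                 if not (end <= used_start or pos >= used_end):
--                     overlaps = True
--                     break
--
--             if not overlaps:
--                 # Add match
--                 matches.append((pos, end, code_idx, phrase))
--                 # Mark positions as used
--                 for i in range(pos, end):
--                     used_positions.add((i, i + 1))
--
--             start = pos + 1
--
--     # Sort matches by start position
--     matches.sort(key=lambda x: x[0])
--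
--     return matches
-- ===== SOURCE B (Python) =====
-- def find_longest_matches(text, clv_map, case_sensitive=False):
--     # Staged passes: materialize every candidate occurrence of every phrase,
--     # order the candidate list once by the greedy priority, then make one
--     # selection sweep testing interval overlap against the accepted matches
--     # themselves -- no per-character bookkeeping.
--     if not case_sensitive:
--         text = text.lower()
--         clv_map = {p.lower(): c for p, c in clv_map.items()}
--     candidates = [(pos, pos + len(p), code, p)
--                   for p, code in clv_map.items()
--                   for pos in range(len(text) - len(p) + 1)
--                   if text[pos:pos + len(p)] == p]
--     # Stable sort by descending length realizes the greedy priority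
--     # (-length, map order, position): candidates are generated in
--     # (map order, position) order already.
--     candidates.sort(key=lambda c: c[1] - c[0], reverse=True)
--     chosen = []
--     for pos, end, code, phrase in candidates:
--         # ranges [pos,end) and [s,e) share a position iff max(start) < min(end)
--         if all(min(end, e) <= max(pos, s) for s, e, _, _ in chosen):
--             chosen.append((pos, end, code, phrase))
--     return sorted(chosen, key=lambda m: m[0])
-- ===== Notes on version B (the rewrite author's own statement) =====
-- stated objective: alternative
-- what changed: A interleaves searching and selecting (for each phrase, a while-loop of str.find calls, each occurrence tested against a per-character used_positions set of (i,i+1) pairs that it also updates); B is three staged passes: materialize a flat list of all candidate occurrences, one global stable sort by descending length realizing the greedy priority (-len, map order, position), then a single selection sweep that tests interval overlap (max of starts < min of ends) against the accepted matches themselves, with no per-character bookkeeping.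
import Mathlib
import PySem

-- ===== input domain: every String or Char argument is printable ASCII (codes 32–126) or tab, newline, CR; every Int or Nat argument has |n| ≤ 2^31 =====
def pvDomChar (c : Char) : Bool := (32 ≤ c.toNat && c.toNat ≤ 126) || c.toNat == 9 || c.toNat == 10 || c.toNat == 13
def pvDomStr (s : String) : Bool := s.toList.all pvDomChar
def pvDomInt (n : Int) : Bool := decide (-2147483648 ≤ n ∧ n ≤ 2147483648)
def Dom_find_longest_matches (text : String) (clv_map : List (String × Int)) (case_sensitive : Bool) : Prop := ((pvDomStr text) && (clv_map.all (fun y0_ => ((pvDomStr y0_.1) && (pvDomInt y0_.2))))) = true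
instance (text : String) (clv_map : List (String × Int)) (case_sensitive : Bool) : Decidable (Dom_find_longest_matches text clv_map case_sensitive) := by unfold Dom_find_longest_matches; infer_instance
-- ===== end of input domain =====

-- B re-decomposes A's interleaved greedy matcher into staged passes: materialize a flat
-- candidate list, one global stable sort by the greedy priority, one selection sweep that
-- tests interval overlap against the accepted matches themselves (no per-character set);
-- objective: alternative decomposition of the same greedy-longest-match semantics.

-- ===== PORT A =====
-- termination fact for the 'while True: pos = text.find(phrase, start)' loop
theorem pvFindFromNat_bounds (s sub : List Char) (k : Nat)
    (h : PySem.Chars.findFrom s sub (k : Int) none ≠ -1) :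
    (k : Int) ≤ PySem.Chars.findFrom s sub (k : Int) none ∧
      PySem.Chars.findFrom s sub (k : Int) none ≤ (s.length : Int) := by
  have h0 : ¬((k : Int) < 0) := by omega
  simp only [PySem.Chars.findFrom, h0, if_false] at h ⊢
  by_cases hlt : ((s.length : Nat) : Int) < (k : Int)
  · rw [if_pos hlt] at h ⊢; exact absurd rfl h
  · rw [if_neg hlt] at h ⊢
    by_cases hneg : PySem.Chars.find (List.drop (Int.toNat (k:Int)) (List.take (Int.toNat ((s.length : Nat) : Int)) s)) sub = -1
    · rw [if_pos hneg] at h ⊢; exact absurd rfl h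
    · rw [if_neg hneg] at h ⊢
      have hge := PySem.Chars.neg_one_le_find (List.drop (Int.toNat (k:Int)) (List.take (Int.toNat ((s.length : Nat) : Int)) s)) sub
      have hle := PySem.Chars.find_le_length (List.drop (Int.toNat (k:Int)) (List.take (Int.toNat ((s.length : Nat) : Int)) s)) sub
      simp only [Int.toNat_natCast, List.length_drop, List.length_take, min_self] at hneg hge hle h ⊢
      constructor <;> omega

-- one considered occurrence of A's inner while loop: overlap test against the
-- used-positions set ('for … in used_positions: … break' is an order-independent any),
-- then append + mark
def pvStepA (pos pend code : Int) (phrase : String)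
    (st : List (Int × Int × Int × String) × PySem.Set (Int × Int)) :
    List (Int × Int × Int × String) × PySem.Set (Int × Int) :=
  let overlaps := st.2.any (fun u => !(decide (pend ≤ u.1) || decide (pos ≥ u.2)))
  if overlaps then st
  else (st.1 ++ [(pos, pend, code, phrase)],
        (PySem.List.pyRange pos pend 1).foldl (fun s i => PySem.Set.add s (i, i + 1)) st.2)

-- A's 'while True: pos = text_to_search.find(phrase, start); …; start = pos + 1'
def pvWhileA (ts phrase : String) (code : Int) (start : Nat)
    (st : List (Int × Int × Int × String) × PySem.Set (Int × Int)) :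
    List (Int × Int × Int × String) × PySem.Set (Int × Int) :=
  let pos := PySem.Str.findFrom ts phrase (start : Int) none
  if h : pos = -1 then st
  else
    pvWhileA ts phrase code (pos.toNat + 1)
      (pvStepA pos (pos + PySem.Str.len phrase) code phrase st)
termination_by ts.toList.length + 1 - start
decreasing_by
  simp only [PySem.Str.findFrom] at h ⊢
  have hb := pvFindFromNat_bounds ts.toList phrase.toList start h
  omega

def find_longest_matches (text : String) (clv_map : List (String × Int)) (case_sensitive : Bool) : List (Int × Int × Int × String) :=
  -- the List argument is the items of the Python dict parameter; materialize it with dict semantics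
  let d0 : PySem.Dict String Int := clv_map.foldl (fun d p => d.insert p.1 p.2) PySem.Dict.empty
  let pre : PySem.Dict String Int × String :=
    if case_sensitive = false then
      (d0.items.foldl (fun d p => d.insert (PySem.Str.lower p.1) p.2) PySem.Dict.empty,
       PySem.Str.lower text)
    else (d0, text)
  let phrases_sorted := PySem.List.sorted pre.1.keys (fun p => PySem.Str.len p) true
  -- clv_map_to_use[phrase]: KeyError unreachable (phrase ∈ keys), ported as getD with junk default
  let res := phrases_sorted.foldl
      (fun st phrase => pvWhileA pre.2 phrase (pre.1.getD phrase 0) 0 st)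
      ([], PySem.Set.empty)
  PySem.List.sorted res.1 (fun x => x.1) false

-- ===== PORT B =====
-- occurrence positions of phrase, by slice comparison at every position
def pvOccB (ts phrase : String) : List Int :=
  (PySem.List.pyRange 0 (PySem.Str.len ts - PySem.Str.len phrase + 1) 1).filter
    (fun pos => PySem.Str.slice ts (some pos) (some (pos + PySem.Str.len phrase)) == phrase)

-- the selection sweep's body: interval-overlap test against the accepted matches
def pvSelB (acc : List (Int × Int × Int × String)) (c : Int × Int × Int × String) :
    List (Int × Int × Int × String) :=
  if acc.all (fun m => decide (min c.2.1 m.2.1 ≤ max c.1 m.1)) then acc ++ [c] else acc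

def find_longest_matches_alt (text : String) (clv_map : List (String × Int)) (case_sensitive : Bool) : List (Int × Int × Int × String) :=
  -- the List argument is the items of the Python dict parameter; materialize it with dict semantics
  let d0 : PySem.Dict String Int := clv_map.foldl (fun d p => d.insert p.1 p.2) PySem.Dict.empty
  let pre : PySem.Dict String Int × String :=
    if case_sensitive = false then
      (d0.items.foldl (fun d p => d.insert (PySem.Str.lower p.1) p.2) PySem.Dict.empty,
       PySem.Str.lower text)
    else (d0, text)
  let candidates := pre.1.items.flatMap (fun kv =>
    (pvOccB pre.2 kv.1).map (fun pos => (pos, pos + PySem.Str.len kv.1, kv.2, kv.1)))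
  let ranked := PySem.List.sorted candidates (fun c => c.2.1 - c.1) true
  let chosen := ranked.foldl pvSelB []
  PySem.List.sorted chosen (fun m => m.1) false

-- ===== PRECONDITION & SPEC =====
def Spec_find_longest_matches (text : String) (clv_map : List (String × Int)) (case_sensitive : Bool) (out : List (Int × Int × Int × String)) : Prop := out = find_longest_matches_alt text clv_map case_sensitive
instance (text : String) (clv_map : List (String × Int)) (case_sensitive : Bool) (out : List (Int × Int × Int × String)) : Decidable (Spec_find_longest_matches text clv_map case_sensitive out) := by unfold Spec_find_longest_matches; infer_instance

-- ===== CLAIM (what is proved, stated in full; the proofs are below) =====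
def Claim_equal_find_longest_matches : Prop := ∀ (text : String) (clv_map : List (String × Int)) (case_sensitive : Bool), Dom_find_longest_matches text clv_map case_sensitive → Spec_find_longest_matches text clv_map case_sensitive (find_longest_matches text clv_map case_sensitive)

-- ===== LEMMAS AND PROOFS =====

-- all occurrence positions ≥ k of p in s, in increasing order
def pvOccFrom (s p : List Char) (k : Nat) : List Nat :=
  (List.range (s.length + 1)).filter (fun i => decide (k ≤ i) && decide (p <+: s.drop i))

theorem pvOccFrom_nil_of_gt (s p : List Char) (k : Nat) (hk : s.length < k) :
    pvOccFrom s p k = [] := by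
  unfold pvOccFrom
  rw [List.filter_eq_nil_iff]
  intro i hi
  simp only [List.mem_range] at hi
  simp only [Bool.and_eq_true, decide_eq_true_eq]
  omega

theorem pvOccFrom_nil_of_none (s p : List Char) (k : Nat)
    (hnone : ∀ i, k ≤ i → ¬ p <+: s.drop i) :
    pvOccFrom s p k = [] := by
  unfold pvOccFrom
  rw [List.filter_eq_nil_iff]
  intro i _
  simp only [Bool.and_eq_true, decide_eq_true_eq]
  rintro ⟨h1, h2⟩
  exact hnone i h1 h2

theorem pvOccFrom_cons (s p : List Char) (k m : Nat) (hk : k ≤ m) (hm : m ≤ s.length)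
    (hq : p <+: s.drop m) (hmin : ∀ i, k ≤ i → i < m → ¬ p <+: s.drop i) :
    pvOccFrom s p k = m :: pvOccFrom s p (m + 1) := by
  unfold pvOccFrom
  have happ1 := @List.range'_append 0 m (s.length + 1 - m) 1
  simp only [Nat.one_mul, Nat.zero_add] at happ1
  have hsplit : List.range (s.length + 1)
      = List.range' 0 m ++ List.range' m (s.length + 1 - m) := by
    rw [List.range_eq_range', happ1]
    congr 1
    omega
  have h2 : List.range' m (s.length + 1 - m) = m :: List.range' (m + 1) (s.length - m) := by
    have he : s.length + 1 - m = (s.length - m) + 1 := by omega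
    rw [he, List.range'_succ]
  have h1 : (List.range' 0 m).filter (fun i => decide (k ≤ i) && decide (p <+: s.drop i)) = [] := by
    rw [List.filter_eq_nil_iff]
    intro i hi
    have hilt : i < m := by
      have := List.mem_range'_1.mp hi; omega
    simp only [Bool.and_eq_true, decide_eq_true_eq]
    rintro ⟨ha, hb⟩
    exact hmin i ha hilt hb
  have hpass : (decide (k ≤ m) && decide (p <+: s.drop m)) = true := by
    simp [hk, hq]
  conv_lhs => rw [hsplit, List.filter_append, h1, List.nil_append, h2]
  rw [List.filter_cons, hpass, if_pos rfl]
  have happ2 := @List.range'_append 0 (m + 1) (s.length - m) 1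
  simp only [Nat.one_mul, Nat.zero_add] at happ2
  have hsplit2 : List.range (s.length + 1)
      = List.range' 0 (m + 1) ++ List.range' (m + 1) (s.length - m) := by
    rw [List.range_eq_range', happ2]
    congr 1
    omega
  have h3 : (List.range' 0 (m + 1)).filter (fun i => decide (m + 1 ≤ i) && decide (p <+: s.drop i)) = [] := by
    rw [List.filter_eq_nil_iff]
    intro i hi
    have : i < m + 1 := by have := List.mem_range'_1.mp hi; omega
    simp only [Bool.and_eq_true, decide_eq_true_eq]
    omega
  conv_rhs => rw [hsplit2, List.filter_append, h3, List.nil_append]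
  congr 1
  apply List.filter_congr
  intro i hi
  have him : m + 1 ≤ i := by have := List.mem_range'_1.mp hi; omega
  have hki : k ≤ i := by omega
  simp [him, hki]

-- A's while loop is the fold of pvStepA over the occurrence positions ≥ start
theorem pvWhileA_eq_fold (ts phrase : String) (code : Int) (start : Nat)
    (st : List (Int × Int × Int × String) × PySem.Set (Int × Int)) :
    pvWhileA ts phrase code start st =
      (pvOccFrom ts.toList phrase.toList start).foldl
        (fun st (i : Nat) => pvStepA (i : Int) ((i : Int) + PySem.Str.len phrase) code phrase st) st := by
  suffices H : ∀ (fuel start : Nat), ts.toList.length + 1 - start ≤ fuel →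
      ∀ st, pvWhileA ts phrase code start st =
        (pvOccFrom ts.toList phrase.toList start).foldl
          (fun st (i : Nat) => pvStepA (i : Int) ((i : Int) + PySem.Str.len phrase) code phrase st) st by
    exact H (ts.toList.length + 1 - start) start le_rfl st
  intro fuel
  induction fuel with
  | zero =>
    intro start hle st
    have hgt : ts.toList.length < start := by omega
    rw [pvWhileA.eq_def]
    simp only [PySem.Str.findFrom]
    have hneg : PySem.Chars.findFrom ts.toList phrase.toList (start : Int) none = -1 := by
      by_contra hc
      have := pvFindFromNat_bounds ts.toList phrase.toList start hc
      omega
    rw [pvOccFrom_nil_of_gt _ _ _ hgt, List.foldl_nil, dif_pos hneg]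
  | succ fuel ih =>
    intro start hle st
    rw [pvWhileA.eq_def]
    simp only [PySem.Str.findFrom]
    by_cases hneg : PySem.Chars.findFrom ts.toList phrase.toList (start : Int) none = -1
    · by_cases hgt : ts.toList.length < start
      · rw [pvOccFrom_nil_of_gt _ _ _ hgt, List.foldl_nil, dif_pos hneg]
      · rw [not_lt] at hgt
        have hnone : ∀ i, start ≤ i → ¬ phrase.toList <+: ts.toList.drop i := by
          have hiff := (PySem.Chars.findFrom_natCast_eq_neg_one_iff ts.toList phrase.toList start hgt).mp hneg
          intro i hi hpre
          apply hiff
          rw [List.infix_iff_prefix_suffix]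
          refine ⟨ts.toList.drop i, hpre, ?_⟩
          have hdd : ts.toList.drop i = (ts.toList.drop start).drop (i - start) := by
            rw [List.drop_drop]; congr 1; omega
          rw [hdd]
          exact List.drop_suffix _ _
        rw [pvOccFrom_nil_of_none _ _ _ hnone, List.foldl_nil, dif_pos hneg]
    · have hb := pvFindFromNat_bounds ts.toList phrase.toList start hneg
      have hsle : start ≤ ts.toList.length := by omega
      obtain ⟨h1, h2, h3⟩ := PySem.Chars.findFrom_natCast_spec ts.toList phrase.toList start hsle hneg
      set pos := PySem.Chars.findFrom ts.toList phrase.toList (start : Int) none with hpos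
      have hposnn : (0 : Int) ≤ pos := by omega
      have hcons := pvOccFrom_cons ts.toList phrase.toList start pos.toNat
        (by omega) (by omega) h2 h3
      rw [hcons, List.foldl_cons, dif_neg hneg]
      have hih := ih (pos.toNat + 1) (by omega)
        (pvStepA pos (pos + PySem.Str.len phrase) code phrase st)
      rw [hih]
      have hcast : ((pos.toNat : Nat) : Int) = pos := Int.toNat_of_nonneg hposnn
      rw [hcast]

-- ---- stable sort commutes with flatMap when every block has a uniform key ----

theorem pvInsertBy_prefix {β : Type} (before : β → β → Bool) (x : β) (P M : List β)
    (h : ∀ y ∈ P, before x y = false) :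
    PySem.List.insertBy before x (P ++ M) = P ++ PySem.List.insertBy before x M := by
  induction P with
  | nil => rfl
  | cons p P' ih =>
    simp only [List.cons_append, PySem.List.insertBy]
    rw [h p (List.mem_cons_self), ih (fun y hy => h y (List.mem_cons_of_mem _ hy))]
    simp

theorem pvFoldIns_prefix {β : Type} (before : β → β → Bool) (es P M : List β)
    (h : ∀ e ∈ es, ∀ y ∈ P, before e y = false) :
    es.foldl (fun acc e => PySem.List.insertBy before e acc) (P ++ M)
      = P ++ es.foldl (fun acc e => PySem.List.insertBy before e acc) M := by
  induction es generalizing M with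
  | nil => rfl
  | cons e es' ih =>
    simp only [List.foldl_cons]
    rw [pvInsertBy_prefix before e P M (h e (List.mem_cons_self)),
      ih _ (fun a ha y hy => h a (List.mem_cons_of_mem _ ha) y hy)]

theorem pvInsertBy_at {β : Type} (key : β → Int) (x : β) (P R : List β)
    (hP : ∀ y ∈ P, ¬ key y < key x) (hR : ∀ y ∈ R, key y < key x) :
    PySem.List.insertBy (fun a b => decide (key b < key a)) x (P ++ R) = P ++ x :: R := by
  rw [pvInsertBy_prefix _ x P R (fun y hy => by simp [hP y hy])]
  cases R with
  | nil => rfl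
  | cons r t =>
    simp only [PySem.List.insertBy]
    rw [if_pos (by simp [hR r (List.mem_cons_self)])]

theorem pvFoldIns_block {β : Type} (key : β → Int) (k : Int) (es P R : List β) :
    (∀ e ∈ es, key e = k) → (∀ y ∈ P, ¬ key y < k) → (∀ y ∈ R, key y < k) →
    es.foldl (fun acc e => PySem.List.insertBy (fun a b => decide (key b < key a)) e acc) (P ++ R)
      = P ++ (es ++ R) := by
  induction es generalizing P with
  | nil => intro _ _ _; rfl
  | cons e es' ih =>
    intro hes hP hR
    simp only [List.foldl_cons]
    have hke := hes e (List.mem_cons_self)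
    rw [pvInsertBy_at key e P R (fun y hy => by rw [hke]; exact hP y hy)
        (fun y hy => by rw [hke]; exact hR y hy)]
    have hPe : P ++ e :: R = (P ++ [e]) ++ R := by simp
    rw [hPe, ih (P ++ [e]) (fun a ha => hes a (List.mem_cons_of_mem _ ha))
        (fun y hy => by
          rcases List.mem_append.mp hy with hl | hl
          · exact hP y hl
          · simp only [List.mem_singleton] at hl; subst hl; omega) hR]
    simp

theorem pvInsBlock {α β : Type} (f : α → List β) (key : β → Int) (key' : α → Int)
    (hf : ∀ z, ∀ y ∈ f z, key y = key' z) (L : List α) (x : α)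
    (hL : L.Pairwise (fun a b => key' b ≤ key' a)) :
    (f x).foldl (fun acc e => PySem.List.insertBy (fun a b => decide (key b < key a)) e acc)
        (L.flatMap f)
      = (PySem.List.insertBy (fun a b => decide (key' b < key' a)) x L).flatMap f := by
  induction L with
  | nil =>
    have := pvFoldIns_block key (key' x) (f x) [] [] (hf x) (by simp) (by simp)
    simpa [PySem.List.insertBy] using this
  | cons b L' ih =>
    rw [List.pairwise_cons] at hL
    obtain ⟨hb, hL'⟩ := hL
    simp only [PySem.List.insertBy]
    by_cases hc : key' b < key' x
    · rw [if_pos (by simpa using hc)]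
      have hR : ∀ y ∈ (b :: L').flatMap f, key y < key' x := by
        intro y hy
        obtain ⟨z, hz, hyz⟩ := List.mem_flatMap.mp hy
        rw [hf z y hyz]
        rcases List.mem_cons.mp hz with rfl | hz'
        · exact hc
        · exact lt_of_le_of_lt (hb z hz') hc
      have := pvFoldIns_block key (key' x) (f x) [] ((b :: L').flatMap f) (hf x) (by simp) hR
      simpa using this
    · rw [if_neg (by simpa using hc)]
      have hpre : ∀ e ∈ f x, ∀ y ∈ f b,
          (fun a b => decide (key b < key a)) e y = false := by
        intro e he y hy
        simp only [decide_eq_false_iff_not]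
        rw [hf x e he, hf b y hy]
        omega
      rw [List.flatMap_cons, pvFoldIns_prefix _ (f x) (f b) _ hpre, ih hL',
        List.flatMap_cons]

theorem pvSortedFlatMap {α β : Type} (f : α → List β) (key : β → Int) (key' : α → Int)
    (hf : ∀ z, ∀ y ∈ f z, key y = key' z) (xs : List α) :
    PySem.List.sorted (xs.flatMap f) key true
      = (PySem.List.sorted xs key' true).flatMap f := by
  rw [PySem.List.sorted_rev_eq_foldl_insertBy, List.foldl_flatMap]
  have H : ∀ (l : List α) (p : List α),
      l.foldl (fun acc x => (f x).foldl
          (fun acc e => PySem.List.insertBy (fun a b => decide (key b < key a)) e acc) acc)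
        ((PySem.List.sorted p key' true).flatMap f)
      = (PySem.List.sorted (p ++ l) key' true).flatMap f := by
    intro l
    induction l with
    | nil => intro p; simp
    | cons x l' ih =>
      intro p
      simp only [List.foldl_cons]
      have hstep : (f x).foldl
            (fun acc e => PySem.List.insertBy (fun a b => decide (key b < key a)) e acc)
            ((PySem.List.sorted p key' true).flatMap f)
          = (PySem.List.sorted (p ++ [x]) key' true).flatMap f := by
        rw [pvInsBlock f key key' hf _ x (PySem.List.sorted_pairwise_rev p key')]
        congr 1
        rw [PySem.List.sorted_rev_eq_foldl_insertBy, PySem.List.sorted_rev_eq_foldl_insertBy,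
          List.foldl_append]
        rfl
      rw [hstep, ih (p ++ [x])]
      have hap : p ++ [x] ++ l' = p ++ x :: l' := by simp
      rw [hap]
  have h0 := H xs []
  simpa using h0

-- ---- selection equivalence: per-character used set vs interval test on chosen ----

-- u is a covered per-character pair (i, i+1) of some accepted match in L
def pvCov (L : List (Int × Int × Int × String)) (u : Int × Int) : Prop :=
  ∃ m ∈ L, ∃ i : Int, u = (i, i + 1) ∧ m.1 ≤ i ∧ i < m.2.1

def pvRel (stA : List (Int × Int × Int × String) × PySem.Set (Int × Int))
    (lb : List (Int × Int × Int × String)) : Prop :=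
  stA.1 = lb ∧ ∀ u, u ∈ stA.2 ↔ pvCov lb u

theorem pvStep_rel (pos plen code : Int) (phrase : String)
    (stA : List (Int × Int × Int × String) × PySem.Set (Int × Int))
    (lb : List (Int × Int × Int × String))
    (h : pvRel stA lb) :
    pvRel (pvStepA pos (pos + plen) code phrase stA)
      (pvSelB lb (pos, pos + plen, code, phrase)) := by
  obtain ⟨h1, h2⟩ := h
  have hovF : (lb.all (fun m => decide (min (pos + plen) m.2.1 ≤ max pos m.1))) = true →
      (stA.2.any (fun u => !(decide (pos + plen ≤ u.1) || decide (pos ≥ u.2)))) = false := by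
    intro hall
    rw [List.all_eq_true] at hall
    rw [List.any_eq_false]
    intro u hu
    obtain ⟨m, hm, i, rfl, hi1, hi2⟩ := (h2 u).mp hu
    have := hall m hm
    simp only [decide_eq_true_eq] at this
    have hd : (pos + plen ≤ i) ∨ (i + 1 ≤ pos) := by omega
    rcases hd with hd | hd <;> simp [hd]
  have hovT : (lb.all (fun m => decide (min (pos + plen) m.2.1 ≤ max pos m.1))) = false →
      (stA.2.any (fun u => !(decide (pos + plen ≤ u.1) || decide (pos ≥ u.2)))) = true := by
    intro hall
    simp only [List.all_eq_false] at hall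
    obtain ⟨m, hm, hmp⟩ := hall
    simp only [decide_eq_true_eq, not_le] at hmp
    rw [List.any_eq_true]
    refine ⟨(max pos m.1, max pos m.1 + 1),
      (h2 _).mpr ⟨m, hm, max pos m.1, rfl, by omega, by omega⟩, ?_⟩
    simp only [Bool.not_eq_true', Bool.or_eq_false_iff, decide_eq_false_iff_not, not_le]
    omega
  unfold pvStepA pvSelB
  by_cases hall : (lb.all (fun m => decide (min (pos + plen) m.2.1 ≤ max pos m.1))) = true
  · rw [if_pos hall]
    simp only [hovF hall, Bool.false_eq_true, if_false]
    refine ⟨by rw [h1], ?_⟩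
    intro u
    rw [PySem.Set.mem_foldl_add]
    unfold pvCov
    constructor
    · rintro (hu | ⟨i, hi, rfl⟩)
      · obtain ⟨m, hm, w⟩ := (h2 u).mp hu
        exact ⟨m, List.mem_append_left _ hm, w⟩
      · rw [PySem.List.mem_pyRange_one] at hi
        exact ⟨(pos, pos + plen, code, phrase), List.mem_append_right _ (List.mem_singleton.mpr rfl),
          i, rfl, hi.1, hi.2⟩
    · rintro ⟨m, hm, i, rfl, hi1, hi2⟩
      rcases List.mem_append.mp hm with hm' | hm'
      · exact Or.inl ((h2 _).mpr ⟨m, hm', i, rfl, hi1, hi2⟩)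
      · rw [List.mem_singleton] at hm'
        subst hm'
        exact Or.inr ⟨i, PySem.List.mem_pyRange_one.mpr ⟨hi1, hi2⟩, rfl⟩
  · rw [if_neg hall]
    rw [Bool.not_eq_true] at hall
    simp only [hovT hall, if_true]
    exact ⟨h1, h2⟩

theorem pvFoldNat_rel (phrase : String) (code plen : Int) (L : List Nat)
    (stA : List (Int × Int × Int × String) × PySem.Set (Int × Int))
    (lb : List (Int × Int × Int × String))
    (h : pvRel stA lb) :
    pvRel (L.foldl (fun st (i : Nat) => pvStepA (i : Int) ((i : Int) + plen) code phrase st) stA)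
      (L.foldl (fun lb (i : Nat) => pvSelB lb ((i : Int), (i : Int) + plen, code, phrase)) lb) := by
  induction L generalizing stA lb with
  | nil => exact h
  | cons x l ih => exact ih _ _ (pvStep_rel (x : Int) plen code phrase _ _ h)

-- ---- sort keys ↔ sort items, and B's scan finds exactly the occurrences ----

theorem pvInsertBy_map {α β : Type} (g : α → β) (key : β → Int) (x : α) (ys : List α) :
    PySem.List.insertBy (fun a b => decide (key b < key a)) (g x) (ys.map g) =
      (PySem.List.insertBy (fun a b => decide (key (g b) < key (g a))) x ys).map g := by
  induction ys with
  | nil => simp [PySem.List.insertBy]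
  | cons y l ih =>
    simp only [List.map_cons, PySem.List.insertBy]
    by_cases hc : decide (key (g y) < key (g x)) = true
    · simp [hc]
    · simp only [Bool.not_eq_true] at hc
      simp [hc, ih]

theorem pvSorted_map {α β : Type} (g : α → β) (key : β → Int) (xs : List α) :
    PySem.List.sorted (xs.map g) key true =
      (PySem.List.sorted xs (fun x => key (g x)) true).map g := by
  rw [PySem.List.sorted_rev_eq_foldl_insertBy, PySem.List.sorted_rev_eq_foldl_insertBy,
    List.foldl_map]
  have H : ∀ (acc : List α), xs.foldl
        (fun acc x => PySem.List.insertBy (fun a b => decide (key b < key a)) (g x) acc) (acc.map g)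
      = (xs.foldl (fun acc x => PySem.List.insertBy (fun a b => decide (key (g b) < key (g a))) x acc) acc).map g := by
    intro acc
    induction xs generalizing acc with
    | nil => rfl
    | cons x l ih => simp only [List.foldl_cons, pvInsertBy_map, ih]
  simpa using H []

theorem pvFilter_range_drop (q : Nat → Bool) (M N : Nat) (hMN : M ≤ N)
    (h : ∀ i, M ≤ i → i < N → q i = false) :
    (List.range N).filter q = (List.range M).filter q := by
  have happ := @List.range'_append 0 M (N - M) 1
  simp only [Nat.one_mul, Nat.zero_add] at happ
  have heq : List.range N = List.range M ++ List.range' M (N - M) := by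
    rw [List.range_eq_range', List.range_eq_range', happ]
    congr 1
    omega
  rw [heq, List.filter_append]
  have h2 : (List.range' M (N - M)).filter q = [] := by
    rw [List.filter_eq_nil_iff]
    intro i hi
    have := List.mem_range'_1.mp hi
    exact fun hq => absurd hq (by rw [h i (by omega) (by omega)]; simp)
  rw [h2, List.append_nil]

theorem pvOccB_eq (ts phrase : String) :
    pvOccB ts phrase = (pvOccFrom ts.toList phrase.toList 0).map (fun i : Nat => (i : Int)) := by
  unfold pvOccB pvOccFrom
  rw [PySem.Str.len_eq, PySem.Str.len_eq, PySem.List.pyRange_one, List.filter_map]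
  set n := ts.toList.length with hn
  set L := phrase.toList.length with hL
  have h1 : ∀ x ∈ List.range (((n : Int) - (L : Int) + 1 - 0).toNat),
      ((fun pos => PySem.Str.slice ts (some pos) (some (pos + (L : Int))) == phrase) ∘ (fun k : Nat => (0 : Int) + ↑k)) x
        = (fun i => decide ((0:Nat) ≤ i) && decide (phrase.toList <+: ts.toList.drop i)) x := by
    intro i _
    simp only [Function.comp, Int.zero_add, Nat.zero_le, decide_true, Bool.true_and]
    rw [Bool.eq_iff_iff, beq_iff_eq, decide_eq_true_eq, ← String.toList_inj,
      PySem.Str.toList_slice, PySem.Chars.slice_eq_listSlice, PySem.List.slice_natCast_add]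
    rw [List.prefix_iff_eq_take, ← hL]
    exact eq_comm
  rw [List.filter_congr h1]
  have h2 : (List.range (((n : Int) - (L : Int) + 1 - 0).toNat)).filter
        (fun i => decide ((0:Nat) ≤ i) && decide (phrase.toList <+: ts.toList.drop i))
      = (List.range (n + 1)).filter
        (fun i => decide ((0:Nat) ≤ i) && decide (phrase.toList <+: ts.toList.drop i)) := by
    refine (pvFilter_range_drop _ _ _ (by omega) ?_).symm
    intro i hMi hin
    simp only [Bool.and_eq_false_iff, decide_eq_false_iff_not]
    right
    intro hpre
    have hlen := hpre.length_le
    simp only [List.length_drop, ← hL, ← hn] at hlen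
    omega
  rw [h2]
  exact List.map_congr_left (fun x _ => by simp)

-- core equivalence: A's interleaved nested loops and B's staged
-- generate / sort / sweep passes build the same match list
theorem pvCore (ts : String) (d : PySem.Dict String Int) (hnd : d.keys.Nodup) :
    ((PySem.List.sorted d.keys (fun p => PySem.Str.len p) true).foldl
        (fun st phrase => pvWhileA ts phrase (d.getD phrase 0) 0 st)
        ([], PySem.Set.empty)).1 =
      (PySem.List.sorted
          (d.items.flatMap (fun kv =>
            (pvOccB ts kv.1).map (fun pos => (pos, pos + PySem.Str.len kv.1, kv.2, kv.1))))
          (fun c => c.2.1 - c.1) true).foldl pvSelB [] := by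
  have hf : ∀ kv : String × Int,
      ∀ c ∈ (pvOccB ts kv.1).map (fun pos => (pos, pos + PySem.Str.len kv.1, kv.2, kv.1)),
        c.2.1 - c.1 = PySem.Str.len kv.1 := by
    rintro kv c hc
    obtain ⟨pos, _, rfl⟩ := List.mem_map.mp hc
    simp
  rw [pvSortedFlatMap _ _ (fun kv => PySem.Str.len kv.1) hf]
  rw [PySem.Dict.items_eq_map_keys d hnd 0]
  rw [pvSorted_map (fun k => (k, d.getD k 0)) (fun kv => PySem.Str.len kv.1) d.keys]
  rw [List.foldl_flatMap, List.foldl_map]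
  have hrel : pvRel
      ((PySem.List.sorted d.keys (fun p => PySem.Str.len p) true).foldl
        (fun st phrase => pvWhileA ts phrase (d.getD phrase 0) 0 st)
        ([], PySem.Set.empty))
      ((PySem.List.sorted d.keys (fun p => PySem.Str.len p) true).foldl
        (fun lb k =>
          ((pvOccB ts k).map (fun pos => (pos, pos + PySem.Str.len k, d.getD k 0, k))).foldl
            pvSelB lb)
        []) := by
    generalize PySem.List.sorted d.keys (fun p => PySem.Str.len p) true = ks
    have hinit : pvRel ([], PySem.Set.empty) [] := by
      refine ⟨rfl, ?_⟩
      intro u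
      simp [pvCov, PySem.Set.empty]
    generalize hA : (([], PySem.Set.empty) : List (Int × Int × Int × String) × PySem.Set (Int × Int)) = sA at *
    generalize hB : ([] : List (Int × Int × Int × String)) = sB at *
    clear hA hB
    induction ks generalizing sA sB with
    | nil => exact hinit
    | cons k l ih =>
      simp only [List.foldl_cons]
      apply ih
      rw [pvWhileA_eq_fold, pvOccB_eq, List.map_map, List.foldl_map]
      exact pvFoldNat_rel k (d.getD k 0) (PySem.Str.len k) _ _ _ hinit
  exact hrel.1

-- ===== VERDICT (by name: the statement is the Claim_ definition above) =====
theorem find_longest_matches_spec : Claim_equal_find_longest_matches := by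
  intro text clv_map case_sensitive _
  unfold Spec_find_longest_matches find_longest_matches find_longest_matches_alt
  have hnd0 : ((clv_map.foldl (fun d p => d.insert p.1 p.2) PySem.Dict.empty : PySem.Dict String Int)).keys.Nodup :=
    PySem.Dict.nodup_keys_foldl_insert_key clv_map (fun p => p.1) (fun _ p => p.2)
      PySem.Dict.empty List.nodup_nil
  have hndl : (((clv_map.foldl (fun d p => d.insert p.1 p.2) PySem.Dict.empty : PySem.Dict String Int)).items.foldl
      (fun d p => d.insert (PySem.Str.lower p.1) p.2) PySem.Dict.empty : PySem.Dict String Int).keys.Nodup :=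
    PySem.Dict.nodup_keys_foldl_insert_key
      ((clv_map.foldl (fun d p => d.insert p.1 p.2) PySem.Dict.empty : PySem.Dict String Int)).items
      (fun p => PySem.Str.lower p.1) (fun _ p => p.2)
      PySem.Dict.empty List.nodup_nil
  cases case_sensitive with
  | false =>
    simp only [if_true]
    rw [pvCore (PySem.Str.lower text) _ hndl]
  | true =>
    simp only [Bool.true_eq_false, if_false]
    rw [pvCore text _ hnd0]
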